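-- pv_equiv track=rewrite | github.com/overtimepog/CubeMerger | scripts/generate_levels.py | generate_diamond_mask
-- ===== SOURCE A (Python) =====
-- from typing import List, Dict, Tuple
--
-- def generate_diamond_mask(size: int) -> List[List[bool]]:
--     """
--     Diamond shape: cells for which manhattan_distance(center) <= center
--     If size=5, center=2, it forms a diamond from (2,2).
--     """
--     mask = [[False]*size for _ in range(size)]
--     mid = size // 2
--     for i in range(size):
--         for j in range(size):
--             if abs(i - mid) + abs(j - mid) <= mid:
--                 mask[i][j] = True
--     return mask
-- ===== SOURCE B (Python) =====
-- from typing import List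
--
-- def generate_diamond_mask(size: int) -> List[List[bool]]:
--     """Diamond mask built row by row: each row is a contiguous band of True."""
--     mid = size // 2
--     mask = []
--     for i in range(size):
--         w = mid - abs(i - mid)          # half-width of the True band in row i
--         lo = mid - w                    # = abs(i - mid), always >= 0
--         hi = min(size - 1, mid + w)     # clip right edge (even size)
--         mask.append([False] * lo + [True] * (hi - lo + 1) + [False] * (size - 1 - hi))
--     return mask
-- ===== Notes on version B (the rewrite author's own statement) =====
-- stated objective: simpler
-- what changed: Replaces the nested per-cell abs-distance test over an n*n grid with a single loop over rows that builds each row directly as a contiguous False/True/False band computed from the row's half-width.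
import Mathlib
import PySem

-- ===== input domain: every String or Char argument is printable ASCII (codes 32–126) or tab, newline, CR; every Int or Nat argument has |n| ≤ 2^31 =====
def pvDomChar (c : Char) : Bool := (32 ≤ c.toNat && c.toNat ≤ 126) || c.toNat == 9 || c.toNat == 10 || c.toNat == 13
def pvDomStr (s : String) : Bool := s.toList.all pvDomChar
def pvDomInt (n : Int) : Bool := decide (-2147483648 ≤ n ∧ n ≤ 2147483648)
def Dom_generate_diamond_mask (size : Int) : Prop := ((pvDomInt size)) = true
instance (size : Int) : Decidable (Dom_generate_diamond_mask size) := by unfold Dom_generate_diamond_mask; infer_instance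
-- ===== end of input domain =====

-- B replaces A's per-cell nested abs test by one loop over rows, each row built
-- as a contiguous True band (objective: simpler). Return values proved equal; A's
-- in-place mutation of its own fresh mask is not caller-observable.

-- ===== PORT A =====
-- mask[i][j] = True (i, j are the in-range loop indices, hence nonnegative)
def pvSet2 (m : List (List Bool)) (i j : Int) : List (List Bool) :=
  m.set i.toNat ((m.getD i.toNat []).set j.toNat true)

def generate_diamond_mask (size : Int) : List (List Bool) :=
  let mask := (PySem.List.pyRange 0 size 1).map (fun _ => List.replicate size.toNat false)
  let mid := PySem.Int.floordiv size 2
  (PySem.List.pyRange 0 size 1).foldl (fun mask i =>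
    (PySem.List.pyRange 0 size 1).foldl (fun mask j =>
      if |i - mid| + |j - mid| ≤ mid then pvSet2 mask i j else mask) mask) mask

-- ===== PORT B =====
def generate_diamond_mask_alt (size : Int) : List (List Bool) :=
  let mid := PySem.Int.floordiv size 2
  (PySem.List.pyRange 0 size 1).map (fun i =>
    let w := mid - |i - mid|
    let lo := mid - w
    let hi := min (size - 1) (mid + w)
    List.replicate lo.toNat false ++ List.replicate (hi - lo + 1).toNat true
      ++ List.replicate (size - 1 - hi).toNat false)

-- ===== PRECONDITION & SPEC =====
def Spec_generate_diamond_mask (size : Int) (out : List (List Bool)) : Prop := out = generate_diamond_mask_alt size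
instance (size : Int) (out : List (List Bool)) : Decidable (Spec_generate_diamond_mask size out) := by unfold Spec_generate_diamond_mask; infer_instance

-- ===== CLAIM (what is proved, stated in full; the proofs are below) =====
def Claim_equal_generate_diamond_mask : Prop := ∀ (size : Int), Dom_generate_diamond_mask size → Spec_generate_diamond_mask size (generate_diamond_mask size)

-- ===== LEMMAS AND PROOFS =====

-- A's inner j-loop only rewrites row i of the mask.
theorem pv_inner_set (P : Int → Prop) [DecidablePred P] (js : List Int) :
    ∀ (m : List (List Bool)) (i : Int),
      js.foldl (fun mask j => if P j then pvSet2 mask i j else mask) m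
        = m.set i.toNat (js.foldl (fun r j => if P j then r.set j.toNat true else r) (m.getD i.toNat [])) := by
  induction js with
  | nil =>
    intro m i
    simp only [List.foldl_nil]
    rcases Nat.lt_or_ge i.toNat m.length with h | h
    · simp [List.getElem?_eq_getElem h]
    · simp [List.set_eq_of_length_le h]
  | cons j js ih =>
    intro m i
    simp only [List.foldl_cons]
    by_cases hP : P j
    · simp only [if_pos hP]
      rw [ih]
      show (pvSet2 m i j).set i.toNat _ = _
      have hset2 : pvSet2 m i j = m.set i.toNat ((m.getD i.toNat []).set j.toNat true) := rfl
      have hgetD : (pvSet2 m i j).getD i.toNat [] = (m.getD i.toNat []).set j.toNat true := by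
        rcases Nat.lt_or_ge i.toNat m.length with h | h
        · rw [hset2]; simp [h]
        · have h0 : m.getD i.toNat [] = [] := by
            rw [List.getD_eq_getElem?_getD, List.getElem?_eq_none h]
            rfl
          rw [hset2, h0]
          simp only [List.set_nil, List.set_eq_of_length_le h]
          exact h0
      rw [hgetD, hset2, List.set_set]
    · simp only [if_neg hP]
      exact ih m i

-- the j-loop processing range(0, m) on a fresh all-False row of length n
theorem pv_row_aux (n : ℕ) (P : Int → Prop) [DecidablePred P] :
    ∀ (m : ℕ), m ≤ n →
      (PySem.List.pyRange 0 m 1).foldl (fun r j => if P j then r.set j.toNat true else r)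
          (List.replicate n false)
        = (List.range n).map (fun (k : ℕ) => decide ((k : Int) < (m : Int) ∧ P (k : Int))) := by
  intro m
  induction m with
  | zero =>
    intro _
    simp only [Nat.cast_zero]
    rw [PySem.List.pyRange_one_eq_nil (le_refl 0)]
    simp only [List.foldl_nil]
    apply List.ext_getElem (by simp)
    intro k h1 h2
    simp only [List.getElem_replicate, List.getElem_map, List.getElem_range]
    rw [eq_comm, decide_eq_false_iff_not]
    rintro ⟨hlt, -⟩
    omega
  | succ m ih =>
    intro hm
    have hm' : m ≤ n := Nat.le_of_succ_le hm
    have hc : ((m + 1 : ℕ) : Int) = (m : Int) + 1 := by push_cast; ring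
    rw [hc, PySem.List.pyRange_one_succ_right (by positivity), List.foldl_append,
        ih hm']
    simp only [List.foldl_cons, List.foldl_nil]
    have hmn : m < n := hm
    have hmtoNat : ((m : Int)).toNat = m := by omega
    by_cases hP : P (m : Int)
    · rw [if_pos hP]
      apply List.ext_getElem (by simp)
      intro k h1 h2
      simp only [List.length_map, List.length_range] at h2
      simp only [hmtoNat]
      by_cases hkm : k = m
      · subst hkm
        rw [List.getElem_set_self (by simp; omega)]
        simp only [List.getElem_map, List.getElem_range]
        rw [eq_comm, decide_eq_true_eq]
        exact ⟨by omega, hP⟩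
      · rw [List.getElem_set_ne (by omega)]
        simp only [List.getElem_map, List.getElem_range]
        rw [decide_eq_decide]
        constructor
        · rintro ⟨h, hp⟩; exact ⟨by omega, hp⟩
        · rintro ⟨h, hp⟩
          refine ⟨?_, hp⟩
          have hne : (k : Int) ≠ (m : Int) := by
            intro hh
            exact hkm (by exact_mod_cast hh)
          omega
    · rw [if_neg hP]
      apply List.ext_getElem (by simp)
      intro k h1 h2
      simp only [List.length_map, List.length_range] at h2
      simp only [List.getElem_map, List.getElem_range]
      rw [decide_eq_decide]
      constructor
      · rintro ⟨h, hp⟩; exact ⟨by omega, hp⟩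
      · rintro ⟨h, hp⟩
        refine ⟨?_, hp⟩
        by_cases hkm : (k : Int) = (m : Int)
        · exact absurd hp (by rw [hkm]; exact hP)
        · omega

-- the j-loop on a fresh all-False row computes the pointwise predicate row
theorem pv_row_loop (n : ℕ) (P : Int → Prop) [DecidablePred P] :
    (PySem.List.pyRange 0 n 1).foldl (fun r j => if P j then r.set j.toNat true else r)
        (List.replicate n false)
      = (List.range n).map (fun (k : ℕ) => decide (P (k : Int))) := by
  rw [pv_row_aux n P n (le_refl n)]
  apply List.map_congr_left
  intro k hk
  rw [List.mem_range] at hk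
  rw [decide_eq_decide]
  exact ⟨fun h => h.2, fun h => ⟨by omega, h⟩⟩

-- getElem of a three-band False/True/False row
theorem pv_band_get (p q r k : ℕ) (h : k < p + q + r) :
    (List.replicate p false ++ List.replicate q true ++ List.replicate r false)[k]'(by
      simp; omega)
      = decide (p ≤ k ∧ k < p + q) := by
  rcases Nat.lt_or_ge k p with h1 | h1
  · rw [List.getElem_append_left (by simp; omega), List.getElem_append_left (by simp; omega)]
    simp; omega
  · rcases Nat.lt_or_ge k (p + q) with h2 | h2
    · rw [List.getElem_append_left (by simp; omega),
          List.getElem_append_right (by simp; omega)]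
      simp; omega
    · rw [List.getElem_append_right (by simp; omega)]
      simp; omega

-- B's band row equals the pointwise predicate row (for a row index 0 ≤ i < n)
theorem pv_band_row (n : ℕ) (mid i : Int) (hmid : mid = (n : Int) / 2)
    (h0 : 0 ≤ i) (hn : i < (n : Int)) :
    List.replicate (mid - (mid - |i - mid|)).toNat false
        ++ List.replicate (min ((n : Int) - 1) (mid + (mid - |i - mid|)) - (mid - (mid - |i - mid|)) + 1).toNat true
        ++ List.replicate ((n : Int) - 1 - min ((n : Int) - 1) (mid + (mid - |i - mid|))).toNat false
      = (List.range n).map (fun (k : ℕ) => decide (|i - mid| + |(k : Int) - mid| ≤ mid)) := by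
  have habs : |i - mid| = i - mid ∨ |i - mid| = -(i - mid) := abs_choice _
  have ha0 : 0 ≤ |i - mid| := abs_nonneg _
  generalize hA : |i - mid| = a at habs ha0 ⊢
  have hmin : min ((n : Int) - 1) (mid + (mid - a)) = (n : Int) - 1 ∨
      min ((n : Int) - 1) (mid + (mid - a)) = mid + (mid - a) := min_choice _ _
  have hml : min ((n : Int) - 1) (mid + (mid - a)) ≤ (n : Int) - 1 := min_le_left _ _
  have hmr : min ((n : Int) - 1) (mid + (mid - a)) ≤ mid + (mid - a) := min_le_right _ _
  generalize hE : min ((n : Int) - 1) (mid + (mid - a)) = e at hmin hml hmr ⊢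
  apply List.ext_getElem (by
    simp only [List.length_append, List.length_replicate, List.length_map, List.length_range]
    omega)
  intro k h1 h2
  simp only [List.length_map, List.length_range] at h2
  rw [pv_band_get _ _ _ _ (by omega)]
  simp only [List.getElem_map, List.getElem_range]
  rw [decide_eq_decide]
  have hbabs : |(k : Int) - mid| = (k : Int) - mid ∨ |(k : Int) - mid| = -((k : Int) - mid) :=
    abs_choice _
  have hb0 : 0 ≤ |(k : Int) - mid| := abs_nonneg _
  generalize hB : |(k : Int) - mid| = b at hbabs hb0 ⊢
  omega

-- the outer i-loop over range(0, m) on the fresh n×n all-False mask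
theorem pv_outer_aux (n : ℕ) (Q : Int → Int → Prop) [∀ i, DecidablePred (Q i)] :
    ∀ (m : ℕ), m ≤ n →
      (PySem.List.pyRange 0 m 1).foldl (fun mask i =>
          (PySem.List.pyRange 0 n 1).foldl (fun mask j =>
            if Q i j then pvSet2 mask i j else mask) mask)
        ((List.range n).map (fun _ => List.replicate n false))
      = (List.range n).map (fun (i : ℕ) =>
          if i < m then (List.range n).map (fun (k : ℕ) => decide (Q (i : Int) (k : Int)))
          else List.replicate n false) := by
  intro m
  induction m with
  | zero =>
    intro _
    simp only [Nat.cast_zero]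
    rw [PySem.List.pyRange_one_eq_nil (le_refl 0)]
    simp
  | succ m ih =>
    intro hm
    have hm' : m ≤ n := Nat.le_of_succ_le hm
    have hmn : m < n := hm
    have hc : ((m + 1 : ℕ) : Int) = (m : Int) + 1 := by push_cast; ring
    rw [hc, PySem.List.pyRange_one_succ_right (by positivity), List.foldl_append,
        ih hm']
    simp only [List.foldl_cons, List.foldl_nil]
    rw [pv_inner_set (Q (m : Int)) (PySem.List.pyRange 0 n 1)]
    have hmtoNat : ((m : Int)).toNat = m := by omega
    simp only [hmtoNat]
    have hgetD :
        (((List.range n).map (fun (i : ℕ) =>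
          if i < m then (List.range n).map (fun (k : ℕ) => decide (Q (i : Int) (k : Int)))
          else List.replicate n false)).getD m []) = List.replicate n false := by
      rw [List.getD_eq_getElem _ _ (by simp; omega)]
      simp
    rw [hgetD, pv_row_loop n (Q (m : Int))]
    apply List.ext_getElem (by simp)
    intro k h1 h2
    simp only [List.length_map, List.length_range] at h2
    by_cases hkm : k = m
    · subst hkm
      rw [List.getElem_set_self (by simp; omega)]
      simp
    · rw [List.getElem_set_ne (by omega)]
      simp only [List.getElem_map, List.getElem_range]
      by_cases hk : k < m
      · rw [if_pos hk, if_pos (by omega)]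
      · rw [if_neg hk, if_neg (by omega)]

-- ===== VERDICT (by name: the statement is the Claim_ definition above) =====
theorem generate_diamond_mask_spec : Claim_equal_generate_diamond_mask := by
  unfold Claim_equal_generate_diamond_mask Spec_generate_diamond_mask
  intro size _
  unfold generate_diamond_mask generate_diamond_mask_alt
  by_cases hs : size ≤ 0
  · rw [PySem.List.pyRange_one_eq_nil hs]
    simp
  · have hn : ((size.toNat : ℕ) : Int) = size := Int.toNat_of_nonneg (by omega)
    set n := size.toNat with hndef
    have hmid : PySem.Int.floordiv size 2 = (n : Int) / 2 := by
      rw [PySem.Int.floordiv_eq_ediv_of_pos (by norm_num), hn]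
    rw [hmid, ← hn]
    have hmask0 : (PySem.List.pyRange 0 (n : Int) 1).map (fun _ : Int => List.replicate n false)
        = (List.range n).map (fun _ : ℕ => List.replicate n false) := by
      rw [PySem.List.pyRange_zero_natCast, List.map_map]
      rfl
    rw [hmask0]
    have houter := pv_outer_aux n
      (fun i j => |i - (n : Int) / 2| + |j - (n : Int) / 2| ≤ (n : Int) / 2) n (le_refl n)
    beta_reduce at houter
    rw [houter, PySem.List.pyRange_zero_natCast n, List.map_map]
    apply List.map_congr_left
    intro i hi
    rw [List.mem_range] at hi
    simp only [Function.comp_apply]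
    rw [if_pos hi]
    exact (pv_band_row n ((n : Int) / 2) (i : Int) rfl (by positivity) (by exact_mod_cast hi)).symm
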